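-- pv_equiv track=rewrite | github.com/frymash/NUS-CS1010X | past_year_papers/PE/2022_rePE/re-PE-template-1.py | make_symmetrical_matrix
-- ===== SOURCE A (Python) =====
-- def make_symmetrical_matrix(n):
--     result = []
--     to_add = [num for num in range(n)]
--     for element in range(1, n+1):
--         result.append(to_add.copy())
--         to_add.pop(-1)
--         to_add.insert(0, element)
--     return result
-- ===== SOURCE B (Python) =====
-- def make_symmetrical_matrix(n):
--     return [[abs(i - j) for j in range(n)] for i in range(n)]
-- ===== Notes on version B (the rewrite author's own statement) =====
-- stated objective: simpler
-- what changed: Replaced the mutable pop-last/insert-front row-shifting loop by the closed-form cell formula matrix[i][j] = abs(i - j) computed directly from the indices.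
import Mathlib
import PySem

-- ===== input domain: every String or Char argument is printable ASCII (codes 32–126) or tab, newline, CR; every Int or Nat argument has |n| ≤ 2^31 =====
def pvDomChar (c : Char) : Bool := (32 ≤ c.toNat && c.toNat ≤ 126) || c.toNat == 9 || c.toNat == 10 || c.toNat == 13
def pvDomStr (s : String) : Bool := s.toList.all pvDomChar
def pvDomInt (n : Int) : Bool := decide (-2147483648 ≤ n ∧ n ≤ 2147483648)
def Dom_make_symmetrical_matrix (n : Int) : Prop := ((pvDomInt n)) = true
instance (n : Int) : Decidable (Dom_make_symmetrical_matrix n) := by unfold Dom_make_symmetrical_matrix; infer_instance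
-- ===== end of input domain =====

-- B replaces A's mutable pop-last/insert-front row shifting by the closed-form cell value |i - j|; objective: simpler.

-- ===== PORT A =====
-- `to_add.pop(-1)` removes the last element; inside the loop the list is always
-- nonempty (it has n ≥ 1 elements), so it is ported exactly as `dropLast`,
-- and `to_add.insert(0, element)` as consing `element` in front.
def make_symmetrical_matrix (n : Int) : List (List Int) :=
  ((PySem.List.pyRange 1 (n + 1) 1).foldl
    (fun (st : List (List Int) × List Int) element =>
      (st.1 ++ [st.2], element :: st.2.dropLast))
    ([], PySem.List.pyRange 0 n 1)).1

-- ===== PORT B =====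
def make_symmetrical_matrix_alt (n : Int) : List (List Int) :=
  (PySem.List.pyRange 0 n 1).map (fun i =>
    (PySem.List.pyRange 0 n 1).map (fun j => |i - j|))

-- ===== PRECONDITION & SPEC =====
def Spec_make_symmetrical_matrix (n : Int) (out : List (List Int)) : Prop := out = make_symmetrical_matrix_alt n
instance (n : Int) (out : List (List Int)) : Decidable (Spec_make_symmetrical_matrix n out) := by unfold Spec_make_symmetrical_matrix; infer_instance

-- ===== CLAIM (what is proved, stated in full; the proofs are below) =====
def Claim_equal_make_symmetrical_matrix : Prop := ∀ (n : Int), Dom_make_symmetrical_matrix n → Spec_make_symmetrical_matrix n (make_symmetrical_matrix n)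

-- ===== LEMMAS AND PROOFS =====

-- row i of the matrix, with m columns
def pvRow (i : Int) (m : Nat) : List Int := (List.range m).map (fun j : Nat => |i - (j : Int)|)

theorem pvRow_step (i : Int) (hi : 0 ≤ i) (m : Nat) (hm : 1 ≤ m) :
    (i + 1) :: (pvRow i m).dropLast = pvRow (i + 1) m := by
  obtain ⟨m', rfl⟩ : ∃ m', m = m' + 1 := ⟨m - 1, by omega⟩
  unfold pvRow
  conv_lhs => rw [List.range_succ, List.map_append, List.map_cons, List.map_nil,
                  List.dropLast_concat]
  conv_rhs => rw [List.range_succ_eq_map, List.map_cons, List.map_map]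
  refine List.cons_eq_cons.mpr ⟨by rw [Int.natCast_zero, sub_zero, abs_of_nonneg (by omega)], List.map_congr_left ?_⟩
  intro j _
  simp only [Function.comp]
  congr 1
  push_cast
  ring

theorem pvLoop (cnt : Nat) (m : Nat) (hm : 1 ≤ m) :
    ∀ (a : Int) (res : List (List Int)), 0 ≤ a →
    (PySem.List.pyRange (a + 1) (a + 1 + cnt) 1).foldl
      (fun (st : List (List Int) × List Int) element =>
        (st.1 ++ [st.2], element :: st.2.dropLast))
      (res, pvRow a m) =
    (res ++ (List.range cnt).map (fun t : Nat => pvRow (a + t) m), pvRow (a + cnt) m) := by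
  induction cnt with
  | zero =>
      intro a res _
      rw [PySem.List.pyRange_one_eq_nil (by omega)]
      simp
  | succ c ih =>
      intro a res ha
      rw [PySem.List.pyRange_one_cons (by push_cast; omega)]
      simp only [List.foldl_cons]
      rw [pvRow_step a ha m hm]
      have h2 : (a : Int) + 1 + ((c + 1 : Nat) : Int) = (a + 1) + 1 + (c : Int) := by
        push_cast; ring
      rw [h2, ih (a + 1) (res ++ [pvRow a m]) (by omega)]
      have hfst : res ++ [pvRow a m] ++ (List.range c).map (fun t : Nat => pvRow (a + 1 + t) m)
          = res ++ (List.range (c + 1)).map (fun t : Nat => pvRow (a + t) m) := by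
        rw [List.append_assoc]
        congr 1
        rw [List.range_succ_eq_map, List.map_cons, List.map_map]
        simp only [List.singleton_append]
        refine List.cons_eq_cons.mpr ⟨by norm_num, List.map_congr_left ?_⟩
        intro t _
        simp only [Function.comp]
        congr 1
        push_cast
        ring
      have hsnd : pvRow (a + 1 + (c : Int)) m = pvRow (a + ((c + 1 : Nat) : Int)) m := by
        congr 1
        push_cast
        ring
      rw [hfst, hsnd]

theorem pvCastRange (n : Int) (_hn : 1 ≤ n) :
    PySem.List.pyRange 0 n 1 = (List.range n.toNat).map (fun k : Nat => (k : Int)) := by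
  rw [PySem.List.pyRange_one]
  simp

theorem pvCastRange_eq_pvRow (m : Nat) :
    (List.range m).map (fun k : Nat => (k : Int)) = pvRow 0 m := by
  unfold pvRow
  apply List.map_congr_left
  intro j _
  simp

-- ===== VERDICT (by name: the statement is the Claim_ definition above) =====
theorem make_symmetrical_matrix_spec : Claim_equal_make_symmetrical_matrix := by
  intro n _
  unfold Spec_make_symmetrical_matrix make_symmetrical_matrix make_symmetrical_matrix_alt
  by_cases hn : n ≤ 0
  · rw [PySem.List.pyRange_one_eq_nil (by omega : n + 1 ≤ 1),
        PySem.List.pyRange_one_eq_nil (by omega : n ≤ 0)]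
    simp
  · replace hn : 1 ≤ n := by omega
    have hm : 1 ≤ n.toNat := by omega
    rw [pvCastRange n hn]
    conv_lhs => rw [pvCastRange_eq_pvRow]
    rw [show PySem.List.pyRange 1 (n + 1) 1
          = PySem.List.pyRange ((0 : Int) + 1) ((0 : Int) + 1 + (n.toNat : Int)) 1 by
        congr 1; omega]
    rw [pvLoop n.toNat n.toNat hm 0 [] le_rfl]
    simp only [List.nil_append, List.map_map]
    apply List.map_congr_left
    intro t _
    simp only [Function.comp, zero_add]
    unfold pvRow
    apply List.map_congr_left
    intro j _
    simp [Function.comp]
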